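-- pv_equiv track=rewrite | github.com/adarshs02/adapative-emotion | poc_bird/improved_embeddings.py | _tags_to_text
-- ===== SOURCE A (Python) =====
-- from typing import List, Dict, Any
--
-- def _tags_to_text(tags: List[str]) -> str:
--     """Convert tags to natural language description."""
--     if not tags:
--         return ""
--
--     # Group tags by type (if they follow a pattern)
--     tag_groups = {}
--     for tag in tags:
--         if '_' in tag:
--             prefix = tag.split('_')[0]
--             if prefix not in tag_groups:
--                 tag_groups[prefix] = []
--             tag_groups[prefix].append(tag.replace('_', ' '))
--         else:
--             if 'general' not in tag_groups:
--                 tag_groups['general'] = []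
--             tag_groups['general'].append(tag)
--
--     # Convert to natural language
--     descriptions = []
--     for group, group_tags in tag_groups.items():
--         if group == 'general':
--             descriptions.append(f"involving {', '.join(group_tags)}")
--         else:
--             descriptions.append(f"{group}: {', '.join(group_tags)}")
--
--     return "Context: " + "; ".join(descriptions)
-- ===== SOURCE B (Python) =====
-- def _tags_to_text(tags):
--     if not tags:
--         return ""
--
--     def group_of(t):
--         return t.split('_')[0] if '_' in t else 'general'
--
--     # first pass: distinct group names in first-seen order
--     order = []
--     for t in tags:
--         g = group_of(t)
--         if g not in order:
--             order.append(g)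
--
--     # second pass per group: select and transform matching tags
--     parts = []
--     for g in order:
--         joined = ", ".join(t.replace('_', ' ') if '_' in t else t
--                            for t in tags if group_of(t) == g)
--         parts.append(f"involving {joined}" if g == 'general' else f"{g}: {joined}")
--
--     return "Context: " + "; ".join(parts)
-- ===== Notes on version B (the rewrite author's own statement) =====
-- stated objective: alternative
-- what changed: Replaces A's single-pass dict accumulation (grouping lists built incrementally in a dict) with a two-phase plan: one pass collecting distinct group names in first-seen order, then a per-group rescan of the tag list that filters, transforms and joins the members of each group.
import Mathlib
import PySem

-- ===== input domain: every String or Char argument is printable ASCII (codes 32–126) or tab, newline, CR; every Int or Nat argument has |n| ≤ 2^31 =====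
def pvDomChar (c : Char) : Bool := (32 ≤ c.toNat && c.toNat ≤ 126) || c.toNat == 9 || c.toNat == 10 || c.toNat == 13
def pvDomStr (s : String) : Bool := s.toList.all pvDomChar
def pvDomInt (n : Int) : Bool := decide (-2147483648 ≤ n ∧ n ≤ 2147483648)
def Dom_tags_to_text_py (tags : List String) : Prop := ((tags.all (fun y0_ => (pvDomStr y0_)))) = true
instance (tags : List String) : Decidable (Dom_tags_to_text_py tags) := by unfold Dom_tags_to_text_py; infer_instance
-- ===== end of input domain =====

-- B replaces A's single-pass dict accumulation with a two-phase plan (collect distinct group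
-- names in first-seen order, then rescan the tags per group); objective: alternative.

-- ===== PORT A =====
def tags_to_text_py (tags : List String) : String :=
  if tags = [] then ""
  else
    let tag_groups : PySem.Dict String (List String) :=
      tags.foldl (fun d tag =>
        if PySem.Str.isIn "_" tag then
          let pre := ((PySem.Str.split? tag "_").getD []).getD 0 ""
          let d1 := if d.contains pre then d else d.insert pre []
          d1.modify pre [] (fun l => l ++ [PySem.Str.replace tag "_" " "])
        else
          let d1 := if d.contains "general" then d else d.insert "general" []
          d1.modify "general" [] (fun l => l ++ [tag])) PySem.Dict.empty
    let descriptions : List String :=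
      tag_groups.items.foldl (fun acc p =>
        if p.1 = "general" then acc ++ ["involving " ++ PySem.Str.join ", " p.2]
        else acc ++ [p.1 ++ ": " ++ PySem.Str.join ", " p.2]) []
    "Context: " ++ PySem.Str.join "; " descriptions

-- ===== PORT B =====
def pvGroupOf (t : String) : String :=
  if PySem.Str.isIn "_" t then ((PySem.Str.split? t "_").getD []).getD 0 "" else "general"

def tags_to_text_py_alt (tags : List String) : String :=
  if tags = [] then ""
  else
    let order : List String :=
      tags.foldl (fun acc t =>
        let g := pvGroupOf t
        if acc.contains g then acc else acc ++ [g]) []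
    let parts : List String :=
      order.foldl (fun acc g =>
        let joined := PySem.Str.join ", "
          ((tags.filter (fun t => pvGroupOf t == g)).map
            (fun t => if PySem.Str.isIn "_" t then PySem.Str.replace t "_" " " else t))
        acc ++ [if g == "general" then "involving " ++ joined else g ++ ": " ++ joined]) []
    "Context: " ++ PySem.Str.join "; " parts

-- ===== PRECONDITION & SPEC =====
def Spec_tags_to_text_py (tags : List String) (out : String) : Prop := out = tags_to_text_py_alt tags
instance (tags : List String) (out : String) : Decidable (Spec_tags_to_text_py tags out) := by unfold Spec_tags_to_text_py; infer_instance

-- ===== CLAIM (what is proved, stated in full; the proofs are below) =====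
def Claim_equal_tags_to_text_py : Prop := ∀ (tags : List String), Dom_tags_to_text_py tags → Spec_tags_to_text_py tags (tags_to_text_py tags)

-- ===== LEMMAS AND PROOFS =====
def pvVal (t : String) : String :=
  if PySem.Str.isIn "_" t then PySem.Str.replace t "_" " " else t

def pvCanon (tags : List String) : String :=
  "Context: " ++ PySem.Str.join "; "
    ((PySem.Set.ofList (tags.map pvGroupOf)).map (fun g =>
      if g = "general" then
        "involving " ++ PySem.Str.join ", " ((tags.filter (fun t => pvGroupOf t == g)).map pvVal)
      else
        g ++ ": " ++ PySem.Str.join ", " ((tags.filter (fun t => pvGroupOf t == g)).map pvVal)))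

theorem pv_step_eq (d : PySem.Dict String (List String)) (k : String) (v : String) :
    ((if d.contains k then d else d.insert k ([]:List String)).modify k [] (fun l => l ++ [v]))
      = d.modify k [] (fun l => l ++ [v]) := by
  by_cases h : d.contains k
  · simp [h]
  · have h' : d.contains k = false := by simpa using h
    simp [h, PySem.Dict.modify, PySem.Dict.insert_insert_self, PySem.Dict.getD_insert_self,
      PySem.Dict.getD_of_not_contains d ([]:List String) h']

theorem pv_stepA_eq (d : PySem.Dict String (List String)) (t : String) :
    (if PySem.Str.isIn "_" t then
        let pre := ((PySem.Str.split? t "_").getD []).getD 0 ""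
        let d1 := if d.contains pre then d else d.insert pre []
        d1.modify pre [] (fun l => l ++ [PySem.Str.replace t "_" " "])
      else
        let d1 := if d.contains "general" then d else d.insert "general" []
        d1.modify "general" [] (fun l => l ++ [t]))
      = d.modify (pvGroupOf t) [] (fun l => l ++ [pvVal t]) := by
  by_cases h : PySem.Str.isIn "_" t
  · simp only [h, if_true, pvGroupOf, pvVal, pv_step_eq]
  · simp only [h, Bool.false_eq_true, if_false, pvGroupOf, pvVal, pv_step_eq]

theorem pv_foldl_snoc {α β : Type} (f : α → β) (l : List α) (acc : List β) :
    l.foldl (fun a x => a ++ [f x]) acc = acc ++ l.map f := by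
  induction l generalizing acc with
  | nil => simp
  | cons x xs ih => simp [ih]

theorem pv_foldl_snoc_ite {α β : Type} (c : α → Prop) [DecidablePred c] (f g : α → β)
    (l : List α) (acc : List β) :
    l.foldl (fun a x => if c x then a ++ [f x] else a ++ [g x]) acc
      = acc ++ l.map (fun x => if c x then f x else g x) := by
  induction l generalizing acc with
  | nil => simp
  | cons x xs ih => by_cases h : c x <;> simp [h, ih]

theorem pv_getD (tags : List String) (g : String) :
    (tags.foldl (fun d t => d.modify (pvGroupOf t) [] (fun l => l ++ [pvVal t]))
        (PySem.Dict.empty : PySem.Dict String (List String))).getD g []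
      = (tags.filter (fun t => pvGroupOf t == g)).map pvVal := by
  have hm : ((tags.map (fun t => (pvGroupOf t, pvVal t))).foldl
          (fun d p => d.modify p.1 [] (fun l => l ++ [p.2])) PySem.Dict.empty)
      = (tags.foldl (fun d t => d.modify (pvGroupOf t) [] (fun l => l ++ [pvVal t]))
        (PySem.Dict.empty : PySem.Dict String (List String))) := by
    rw [List.foldl_map]
  rw [← hm, PySem.Dict.getD_foldl_modify_append]
  simp [List.filter_map, Function.comp_def]

theorem pv_keys (tags : List String) :
    (tags.foldl (fun d t => d.modify (pvGroupOf t) [] (fun l => l ++ [pvVal t]))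
        (PySem.Dict.empty : PySem.Dict String (List String))).keys
      = PySem.Set.ofList (tags.map pvGroupOf) := by
  rw [PySem.Dict.keys_foldl_modify_key tags pvGroupOf [] (fun _ t => fun l => l ++ [pvVal t])]
  rw [PySem.Dict.keys_empty, PySem.Set.ofList_eq_foldl]; rfl

theorem pvA_canon (tags : List String) (h0 : ¬ tags = []) :
    tags_to_text_py tags = pvCanon tags := by
  unfold tags_to_text_py
  simp only [h0, if_false]
  have hd : (tags.foldl (fun d tag =>
        if PySem.Str.isIn "_" tag then
          let pre := ((PySem.Str.split? tag "_").getD []).getD 0 ""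
          let d1 := if d.contains pre then d else d.insert pre []
          d1.modify pre [] (fun l => l ++ [PySem.Str.replace tag "_" " "])
        else
          let d1 := if d.contains "general" then d else d.insert "general" []
          d1.modify "general" [] (fun l => l ++ [tag])) PySem.Dict.empty)
      = tags.foldl (fun d t => d.modify (pvGroupOf t) [] (fun l => l ++ [pvVal t]))
          PySem.Dict.empty :=
    List.foldl_ext _ _ _ (fun d t _ => pv_stepA_eq d t)
  rw [hd]
  have hnd := PySem.Dict.nodup_keys_foldl_modify_key tags pvGroupOf []
      (fun _ t => fun l => l ++ [pvVal t]) PySem.Dict.empty PySem.Dict.nodup_keys_empty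
  rw [PySem.Dict.items_eq_map_keys _ hnd [], pv_keys,
      pv_foldl_snoc_ite (fun p : String × List String => p.1 = "general")
        (fun p => "involving " ++ PySem.Str.join ", " p.2)
        (fun p => p.1 ++ ": " ++ PySem.Str.join ", " p.2)]
  unfold pvCanon
  rw [List.map_map, List.nil_append]
  congr 2
  apply List.map_congr_left
  intro g _
  simp only [Function.comp_apply, pv_getD]

theorem pvB_canon (tags : List String) (h0 : ¬ tags = []) :
    tags_to_text_py_alt tags = pvCanon tags := by
  unfold tags_to_text_py_alt
  simp only [h0, if_false]
  have ho : (tags.foldl (fun acc t =>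
        let g := pvGroupOf t
        if acc.contains g then acc else acc ++ [g]) ([] : List String))
      = PySem.Set.ofList (tags.map pvGroupOf) := by
    have hm : ((tags.map pvGroupOf).foldl PySem.Set.add ([] : PySem.Set String))
        = tags.foldl (fun acc t => PySem.Set.add acc (pvGroupOf t)) [] := by
      rw [List.foldl_map]
    rw [PySem.Set.ofList_eq_foldl, hm]
    exact (List.foldl_ext _ _ _ (fun acc t _ => by simp [PySem.Set.add])).symm
  rw [ho, pv_foldl_snoc,
      show (fun t : String => if PySem.Str.isIn "_" t then PySem.Str.replace t "_" " " else t)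
        = pvVal from rfl]
  unfold pvCanon
  rw [List.nil_append]
  congr 2
  apply List.map_congr_left
  intro g _
  by_cases hg : g = "general" <;> simp [hg]

-- ===== VERDICT (by name: the statement is the Claim_ definition above) =====
theorem tags_to_text_py_spec : Claim_equal_tags_to_text_py := by
  intro tags _
  unfold Spec_tags_to_text_py
  by_cases h0 : tags = []
  · simp [h0, tags_to_text_py, tags_to_text_py_alt]
  · rw [pvA_canon tags h0, pvB_canon tags h0]
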